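-- pv_equiv track=rewrite | github.com/rajaboja/Advent-Of-Code-22 | scripts/10.py | get_score_and_pos
-- ===== SOURCE A (Python) =====
-- def get_score_and_pos(data):
--     cycles,score,pos=(0,)*3
--     X=[1]
--     cycle_pos = []
--
--     for i,j in enumerate(data):
--         pos+=sum(X[i:i+1])
--         if not 'noop' in j:
--             n = j.split(' ')[-1]
--             for _ in range(2):
--                 cycles+=1
--                 cycle_pos.append((cycles-1,pos))
--                 if (cycles-20)%40==0:
--                     score+=cycles*pos
--             X.append(int(n))
--         else:
--             X.append(0)
--             cycles+=1
--             cycle_pos.append((cycles-1,pos))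
--             if (cycles-20)%40==0:
--                 score+=cycles*pos
--     return score, cycle_pos
-- ===== SOURCE B (Python) =====
-- def get_score_and_pos(data):
--     # pass 1: flatten the program into a per-cycle delta stream
--     deltas = []
--     for line in data:
--         if 'noop' in line:
--             deltas.append(0)
--         else:
--             deltas.append(0)
--             deltas.append(int(line.split(' ')[-1]))
--     # pass 2: prefix sums of the delta stream give the register after each cycle
--     xs = [1]
--     for d in deltas:
--         xs.append(xs[-1] + d)
--     # pass 3: the register DURING cycle c is xs[c]; pair cycles with values
--     cycle_pos = list(enumerate(xs[:-1]))
--     # pass 4: signal-strength score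
--     score = sum((c + 1) * p for c, p in cycle_pos if c % 40 == 19)
--     return score, cycle_pos
-- ===== Notes on version B (the rewrite author's own statement) =====
-- stated objective: alternative
-- what changed: A runs one interleaved cycle-by-cycle simulation maintaining cycles/score/pos and a growing list X read back via a slice-sum; B is a staged pipeline with no simulation state: it flattens the program into a per-cycle delta stream, takes prefix sums to get the register trace, enumerates it, and sums the signal strengths in a final pass.
import Mathlib
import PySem

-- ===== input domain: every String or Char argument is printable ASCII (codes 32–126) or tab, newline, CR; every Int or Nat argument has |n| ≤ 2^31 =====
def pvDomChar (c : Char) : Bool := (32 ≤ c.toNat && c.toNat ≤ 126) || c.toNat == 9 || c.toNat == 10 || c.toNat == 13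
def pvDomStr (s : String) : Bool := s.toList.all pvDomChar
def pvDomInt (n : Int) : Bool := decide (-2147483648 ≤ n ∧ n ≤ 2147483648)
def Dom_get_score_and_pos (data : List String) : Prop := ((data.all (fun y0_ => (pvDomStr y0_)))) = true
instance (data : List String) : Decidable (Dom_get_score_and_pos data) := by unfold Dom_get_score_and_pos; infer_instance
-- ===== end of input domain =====

-- B replaces A's interleaved cycle-by-cycle simulation by a staged pipeline:
-- flatten the program into a per-cycle delta stream, prefix-sum it into the register
-- trace, enumerate, and score in a final pass (objective: alternative).

-- ===== PORT A =====
-- the last space-split token of j, i.e. j.split(' ')[-1] (split(' ') is never empty, so the defaults are never used)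
def pvLastTok (j : String) : String :=
  PySem.List.pyGetD ((PySem.Str.split? j " ").getD []) (-1) ""

def pvAStep (st : Int × Int × Int × List Int × List (Int × Int)) (ij : Int × String) :
    Int × Int × Int × List Int × List (Int × Int) :=
  let (cycles, score, pos, X, cycle_pos) := st
  let (i, j) := ij
  let pos := pos + (PySem.List.slice X (some i) (some (i + 1))).sum
  if PySem.Str.isIn "noop" j = false then
    let n := pvLastTok j
    let (cycles, score, cycle_pos) :=
      (PySem.List.pyRange 0 2 1).foldl
        (fun (t : Int × Int × List (Int × Int)) _ =>
          let (cycles, score, cycle_pos) := t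
          let cycles := cycles + 1
          let cycle_pos := cycle_pos ++ [(cycles - 1, pos)]
          let score := if PySem.Int.mod (cycles - 20) 40 = 0 then score + cycles * pos else score
          (cycles, score, cycle_pos))
        (cycles, score, cycle_pos)
    (cycles, score, pos, X ++ [(PySem.Int.ofStr? n).getD 0], cycle_pos)
  else
    let X := X ++ [0]
    let cycles := cycles + 1
    let cycle_pos := cycle_pos ++ [(cycles - 1, pos)]
    let score := if PySem.Int.mod (cycles - 20) 40 = 0 then score + cycles * pos else score
    (cycles, score, pos, X, cycle_pos)

def get_score_and_pos (data : List String) : Int × (List (Int × Int)) :=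
  let st := (PySem.List.enumerate data).foldl pvAStep (0, 0, 0, [1], [])
  (st.2.1, st.2.2.2.2)

-- ===== PORT B =====
-- pass 1: per-cycle delta stream
def pvDeltas (data : List String) : List Int :=
  data.foldl (fun ds line =>
    if PySem.Str.isIn "noop" line then ds ++ [0]
    else ds ++ [0, (PySem.Int.ofStr? (pvLastTok line)).getD 0]) []

-- pass 2: xs = [1]; for d in deltas: xs.append(xs[-1] + d)
def pvXs (ds : List Int) : List Int :=
  ds.foldl (fun xs d => xs ++ [PySem.List.pyGetD xs (-1) 0 + d]) [1]

-- pass 4: sum((c + 1) * p for c, p in cycle_pos if c % 40 == 19)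
def pvScoreOf (cp : List (Int × Int)) : Int :=
  cp.foldl (fun s p => if PySem.Int.mod p.1 40 = 19 then s + (p.1 + 1) * p.2 else s) 0

def get_score_and_pos_alt (data : List String) : Int × (List (Int × Int)) :=
  let cycle_pos :=
    PySem.List.enumerate (PySem.List.slice (pvXs (pvDeltas data)) none (some (-1)))
  (pvScoreOf cycle_pos, cycle_pos)

-- ===== PRECONDITION & SPEC =====
-- Pre_ excludes exactly the inputs where Python A raises ValueError: a line without the
-- substring 'noop' whose last space-split token does not parse as an int.
def Pre_get_score_and_pos (data : List String) : Prop :=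
  ∀ j ∈ data, PySem.Str.isIn "noop" j = true ∨ (PySem.Int.ofStr? (pvLastTok j)).isSome = true
instance (data : List String) : Decidable (Pre_get_score_and_pos data) := by
  unfold Pre_get_score_and_pos; infer_instance

def pvWitness_get_score_and_pos : List String := ["noop", "addx 3", "addx -5"]

def Spec_get_score_and_pos (data : List String) (out : Int × (List (Int × Int))) : Prop := out = get_score_and_pos_alt data
instance (data : List String) (out : Int × (List (Int × Int))) : Decidable (Spec_get_score_and_pos data out) := by unfold Spec_get_score_and_pos; infer_instance

-- ===== CLAIM (what is proved, stated in full; the proofs are below) =====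
def Claim_equal_get_score_and_pos : Prop := ∀ (data : List String), Dom_get_score_and_pos data → Pre_get_score_and_pos data → Spec_get_score_and_pos data (get_score_and_pos data)

-- ===== LEMMAS AND PROOFS =====

-- the delta of one instruction
def pvD (j : String) : Int := (PySem.Int.ofStr? (pvLastTok j)).getD 0

-- register value during each successive cycle, by recursion on the program
def pvTrace (x : Int) : List String → List Int
  | [] => []
  | j :: rest =>
      if PySem.Str.isIn "noop" j then x :: pvTrace x rest
      else x :: x :: pvTrace (x + pvD j) rest

-- the suffix of xs produced by the prefix-sum loop
def pvXsTail (x : Int) : List String → List Int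
  | [] => []
  | j :: rest =>
      if PySem.Str.isIn "noop" j then x :: pvXsTail x rest
      else x :: (x + pvD j) :: pvXsTail (x + pvD j) rest

theorem pvDeltas_flat (data : List String) : ∀ acc : List Int,
    data.foldl (fun ds line =>
      if PySem.Str.isIn "noop" line then ds ++ [0]
      else ds ++ [0, (PySem.Int.ofStr? (pvLastTok line)).getD 0]) acc
    = acc ++ data.flatMap (fun j => if PySem.Str.isIn "noop" j then [0] else [0, pvD j]) := by
  induction data with
  | nil => intro acc; simp
  | cons j rest ih =>
    intro acc
    rw [List.foldl_cons, List.flatMap_cons, ih]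
    by_cases h : PySem.Str.isIn "noop" j = true
    · rw [if_pos h, if_pos h]; simp
    · rw [if_neg h, if_neg h]; simp [pvD]

theorem pvXs_fold (data : List String) : ∀ (x : Int) (l : List Int),
    (data.flatMap (fun j => if PySem.Str.isIn "noop" j then [0] else [0, pvD j])).foldl
      (fun xs d => xs ++ [PySem.List.pyGetD xs (-1) 0 + d]) (l ++ [x])
    = (l ++ [x]) ++ pvXsTail x data := by
  induction data with
  | nil => intro x l; simp [pvXsTail]
  | cons j rest ih =>
    intro x l
    rw [List.flatMap_cons, List.foldl_append]
    simp only [pvXsTail]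
    by_cases h : PySem.Str.isIn "noop" j = true
    · rw [if_pos h, if_pos h]
      simp only [List.foldl_cons, List.foldl_nil,
        PySem.List.pyGetD_neg_one_append_singleton, add_zero]
      rw [ih x (l ++ [x])]; simp
    · rw [if_neg h, if_neg h]
      simp only [List.foldl_cons, List.foldl_nil,
        PySem.List.pyGetD_neg_one_append_singleton, add_zero]
      rw [ih (x + pvD j) ((l ++ [x]) ++ [x])]; simp

theorem pvDropLast_tail (data : List String) : ∀ x : Int,
    (x :: pvXsTail x data).dropLast = pvTrace x data := by
  induction data with
  | nil => intro x; simp [pvXsTail, pvTrace]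
  | cons j rest ih =>
    intro x
    simp only [pvXsTail, pvTrace]
    by_cases h : PySem.Str.isIn "noop" j = true
    · rw [if_pos h, if_pos h, ← ih x]; rfl
    · rw [if_neg h, if_neg h, ← ih (x + pvD j)]; rfl

theorem pvAlt_cp (data : List String) :
    PySem.List.slice (pvXs (pvDeltas data)) none (some (-1)) = pvTrace 1 data := by
  have h1 : pvDeltas data
      = data.flatMap (fun j => if PySem.Str.isIn "noop" j then [0] else [0, pvD j]) := by
    simpa using pvDeltas_flat data []
  have h2 : pvXs (pvDeltas data) = [] ++ [(1:Int)] ++ pvXsTail 1 data := by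
    rw [pvXs, h1]; exact pvXs_fold data 1 []
  rw [PySem.List.slice_to_neg_one, h2]
  simpa using pvDropLast_tail data 1

theorem pvScoreOf_append (l : List (Int × Int)) (p : Int × Int) :
    pvScoreOf (l ++ [p]) =
      if PySem.Int.mod p.1 40 = 19 then pvScoreOf l + (p.1 + 1) * p.2 else pvScoreOf l := by
  simp [pvScoreOf]

theorem pvModShift (c : Int) : (PySem.Int.mod (c + 1 - 20) 40 = 0) ↔ (PySem.Int.mod c 40 = 19) := by
  simp only [PySem.Int.mod_eq_emod_of_pos (show (0:Int) < 40 by norm_num)]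
  omega

theorem pvSliceLast (X : List Int) (h : X ≠ []) :
    (PySem.List.slice X (some ((X.length : Int) - 1)) (some ((X.length : Int) - 1 + 1))).sum
      = X.getLast h := by
  obtain ⟨n, hn⟩ : ∃ n, X.length = n + 1 := ⟨X.length - 1, by cases X <;> simp_all⟩
  have h1 : ((X.length : Int) - 1) = ((n : Int)) := by omega
  rw [h1]
  have : ((n : Int) + 1) = ((n+1 : Nat) : Int) := by push_cast; ring
  rw [this, PySem.List.slice_natCast]
  have hd : X.drop n = [X.getLast h] := by
    rw [List.drop_eq_getElem_cons (by omega : n < X.length)]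
    simp [List.drop_eq_nil_of_le (by omega : X.length ≤ n+1), List.getLast_eq_getElem, hn]
  simp [hd]

theorem pvLoop (data : List String) : ∀ (cycles score pos x : Int) (X : List Int)
    (cp : List (Int × Int)) (h : X ≠ []),
    pos + X.getLast h = x →
    cycles = (cp.length : Int) →
    score = pvScoreOf cp →
    (let stA := (PySem.List.enumerate data ((X.length : Int) - 1)).foldl pvAStep
        (cycles, score, pos, X, cp)
     stA.2.2.2.2 = cp ++ PySem.List.enumerate (pvTrace x data) (cp.length : Int)
       ∧ stA.2.1 = pvScoreOf stA.2.2.2.2) := by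
  induction data with
  | nil =>
    intro cycles score pos x X cp h hpos hcyc hsc
    simp_all [PySem.List.enumerate, pvTrace]
  | cons j rest ih =>
    intro cycles score pos x X cp h hpos hcyc hsc
    subst hcyc; subst hsc
    simp only [PySem.List.enumerate_cons, List.foldl_cons]
    have hr2 : PySem.List.pyRange 0 2 1 = [0, 1] := by decide
    have hslice := pvSliceLast X h
    by_cases hno : PySem.Str.isIn "noop" j = true
    · -- noop branch
      have hA : pvAStep ((cp.length : Int), pvScoreOf cp, pos, X, cp) ((X.length : Int) - 1, j)
          = ((cp.length : Int) + 1,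
             pvScoreOf (cp ++ [((cp.length : Int), x)]),
             x, X ++ [0], cp ++ [((cp.length : Int), x)]) := by
        simp only [pvAStep, hno]
        rw [hslice, hpos, pvScoreOf_append]
        simp only [pvModShift]
        norm_num
      rw [hA]
      have hlen : ((X ++ [0]).length : Int) - 1 = ((X.length : Int) - 1) + 1 := by simp
      have hih := ih ((cp.length : Int) + 1) (pvScoreOf (cp ++ [((cp.length : Int), x)]))
          x x (X ++ [0]) (cp ++ [((cp.length : Int), x)]) (by simp)
          (by simp) (by simp) rfl
      rw [hlen] at hih
      obtain ⟨h1, h2⟩ := hih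
      refine ⟨?_, h2⟩
      rw [h1]
      simp only [pvTrace]
      rw [if_pos hno, PySem.List.enumerate_cons]
      simp
    · -- addx branch
      simp only [Bool.not_eq_true] at hno
      have hA : pvAStep ((cp.length : Int), pvScoreOf cp, pos, X, cp) ((X.length : Int) - 1, j)
          = ((cp.length : Int) + 2,
             pvScoreOf (cp ++ [((cp.length : Int), x), ((cp.length : Int) + 1, x)]),
             x, X ++ [pvD j], cp ++ [((cp.length : Int), x), ((cp.length : Int) + 1, x)]) := by
        simp only [pvAStep, hno, reduceIte, hr2, List.foldl_cons, List.foldl_nil]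
        rw [hslice, hpos]
        rw [show cp ++ [((cp.length : Int), x), ((cp.length : Int) + 1, x)]
              = (cp ++ [((cp.length : Int), x)]) ++ [((cp.length : Int) + 1, x)] by simp,
            pvScoreOf_append, pvScoreOf_append]
        simp only [pvModShift]
        norm_num
        exact ⟨by ring, rfl⟩
      rw [hA]
      have hlen : ((X ++ [pvD j]).length : Int) - 1 = ((X.length : Int) - 1) + 1 := by simp
      have hih := ih ((cp.length : Int) + 2)
          (pvScoreOf (cp ++ [((cp.length : Int), x), ((cp.length : Int) + 1, x)]))
          x (x + pvD j) (X ++ [pvD j]) (cp ++ [((cp.length : Int), x), ((cp.length : Int) + 1, x)])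
          (by simp) (by simp) (by simp) rfl
      rw [hlen] at hih
      obtain ⟨h1, h2⟩ := hih
      refine ⟨?_, h2⟩
      rw [h1]
      simp only [pvTrace]
      rw [if_neg (show ¬ PySem.Str.isIn "noop" j = true by simp only [Bool.not_eq_true]; exact hno),
        PySem.List.enumerate_cons, PySem.List.enumerate_cons]
      simp
      ring_nf

-- ===== VERDICT (by name: the statement is the Claim_ definition above) =====
theorem get_score_and_pos_spec : Claim_equal_get_score_and_pos := by
  intro data _ _
  unfold Spec_get_score_and_pos get_score_and_pos get_score_and_pos_alt
  have h := pvLoop data 0 0 0 1 [1] [] (by simp) (by simp) (by simp) rfl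
  norm_num at h
  obtain ⟨h1, h2⟩ := h
  rw [pvAlt_cp]
  simp only [h1, h2]
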